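-- pv_equiv track=rewrite | github.com/chigelmcgovern/aoc2019 | 01_02.py | mass_to_fuel
-- ===== SOURCE A (Python) =====
-- def mass_to_fuel(mass):
--     marginal_fuel = mass // 3 - 2
--     total_fuel = [marginal_fuel]
--     while marginal_fuel > 0:
--         marginal_fuel = marginal_fuel // 3 - 2
--         if marginal_fuel > 0:
--             total_fuel.append(marginal_fuel)
--     return sum(total_fuel)
-- ===== SOURCE B (Python) =====
-- def _positives(m):
--     g = m // 3 - 2
--     if g <= 0:
--         return 0
--     return g + _positives(g)
--
-- def mass_to_fuel(mass):
--     first = mass // 3 - 2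
--     return first + _positives(first)
-- ===== Notes on version B (the rewrite author's own statement) =====
-- stated objective: simpler
-- what changed: Replaces the while-loop that appends positive fuel terms to a list and sums it with a direct recursion over the fuel chain: the first term is added unconditionally and a recursive helper adds each positive successor.
import Mathlib
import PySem

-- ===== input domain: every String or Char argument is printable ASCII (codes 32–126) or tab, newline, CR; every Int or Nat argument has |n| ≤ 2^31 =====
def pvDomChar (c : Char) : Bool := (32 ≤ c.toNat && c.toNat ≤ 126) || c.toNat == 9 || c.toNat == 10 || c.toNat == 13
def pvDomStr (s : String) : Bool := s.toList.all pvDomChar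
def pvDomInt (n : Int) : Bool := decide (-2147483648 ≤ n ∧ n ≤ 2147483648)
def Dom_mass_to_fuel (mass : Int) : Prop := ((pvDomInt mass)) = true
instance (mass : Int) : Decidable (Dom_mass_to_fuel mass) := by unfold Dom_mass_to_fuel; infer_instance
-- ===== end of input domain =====

-- B replaces A's while-loop-plus-list-plus-sum with a direct recursion over the fuel chain
-- (first term added unconditionally, positive successors added recursively): simpler, same cost.

-- next fuel step strictly shrinks a positive value (termination of both ports)
theorem pv_fuel_step_lt {m : Int} (h : 0 < m) :
    (PySem.Int.floordiv m 3 - 2).toNat < m.toNat := by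
  rw [PySem.Int.floordiv_eq_ediv_of_pos (by norm_num)]
  omega

-- ===== PORT A =====
-- the while-loop: state = (marginal_fuel, total_fuel list); returns the final list
def pvALoop (marginal : Int) (total : List Int) : List Int :=
  if 0 < marginal then
    pvALoop (PySem.Int.floordiv marginal 3 - 2)
      (if 0 < PySem.Int.floordiv marginal 3 - 2
       then total ++ [PySem.Int.floordiv marginal 3 - 2] else total)
  else total
termination_by marginal.toNat
decreasing_by exact pv_fuel_step_lt (by omega)

def mass_to_fuel (mass : Int) : Int :=
  let marginal := PySem.Int.floordiv mass 3 - 2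
  (pvALoop marginal [marginal]).sum

-- ===== PORT B =====
def pvPositives (m : Int) : Int :=
  if PySem.Int.floordiv m 3 - 2 ≤ 0 then 0
  else (PySem.Int.floordiv m 3 - 2) + pvPositives (PySem.Int.floordiv m 3 - 2)
termination_by m.toNat
decreasing_by
  rename_i hg
  exact pv_fuel_step_lt (by
    rw [PySem.Int.floordiv_eq_ediv_of_pos (by norm_num : (0:Int) < 3)] at hg; omega)

def mass_to_fuel_alt (mass : Int) : Int :=
  let first := PySem.Int.floordiv mass 3 - 2
  first + pvPositives first

-- ===== PRECONDITION & SPEC =====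
def Spec_mass_to_fuel (mass : Int) (out : Int) : Prop := out = mass_to_fuel_alt mass
instance (mass : Int) (out : Int) : Decidable (Spec_mass_to_fuel mass out) := by unfold Spec_mass_to_fuel; infer_instance

-- ===== CLAIM (what is proved, stated in full; the proofs are below) =====
def Claim_equal_mass_to_fuel : Prop := ∀ (mass : Int), Dom_mass_to_fuel mass → Spec_mass_to_fuel mass (mass_to_fuel mass)

-- ===== LEMMAS AND PROOFS =====

-- the loop's final sum = accumulator's sum + the recursive positive-chain sum, for positive state
theorem pv_loop_sum (n : Nat) : ∀ (m : Int) (acc : List Int), m.toNat ≤ n → 0 < m →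
    (pvALoop m acc).sum = acc.sum + pvPositives m := by
  induction n with
  | zero => intro m acc hle hpos; omega
  | succ n ih =>
    intro m acc hle hpos
    rw [pvALoop, pvPositives]
    simp only [if_pos hpos]
    by_cases hg : 0 < PySem.Int.floordiv m 3 - 2
    · rw [if_pos hg, if_neg (by omega)]
      rw [ih _ _ (by have := pv_fuel_step_lt hpos; omega) hg]
      simp [add_assoc]
    · rw [if_neg hg, if_pos (by omega)]
      rw [pvALoop, if_neg hg]
      simp

theorem mass_to_fuel_eq_alt (mass : Int) : mass_to_fuel mass = mass_to_fuel_alt mass := by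
  unfold mass_to_fuel mass_to_fuel_alt
  set first := PySem.Int.floordiv mass 3 - 2 with hfirst
  show (pvALoop first [first]).sum = first + pvPositives first
  by_cases h : 0 < first
  · rw [pv_loop_sum first.toNat first [first] le_rfl h]
    simp
  · rw [pvALoop.eq_def, if_neg h, pvPositives.eq_def]
    rw [if_pos]
    · simp
    · have h3 : PySem.Int.floordiv first 3 = first / 3 :=
        PySem.Int.floordiv_eq_ediv_of_pos (by norm_num)
      omega

-- ===== VERDICT (by name: the statement is the Claim_ definition above) =====
theorem mass_to_fuel_spec : Claim_equal_mass_to_fuel := by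
  intro mass _
  exact mass_to_fuel_eq_alt mass
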